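-- pv_equiv track=rewrite | github.com/mendes000/psicoapp | pages/pacientes.py | formatar_telefone_br
-- ===== SOURCE A (Python) =====
-- def formatar_telefone_br(valor):
--     digitos = "".join(c for c in str(valor or "") if c.isdigit())
--     if len(digitos) > 11 and digitos.startswith("55"):
--         digitos = digitos[2:]
--     digitos = digitos[:11]
--
--     if not digitos:
--         return ""
--     if len(digitos) <= 2:
--         return f"({digitos}"
--
--     ddd = digitos[:2]
--     restante = digitos[2:]
--     if len(restante) == 0:
--         return f"({ddd})"
--     if len(restante) == 1:
--         return f"({ddd}) {restante}"
--
--     primeiro = restante[0]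
--     miolo = restante[1:5]
--     final = restante[5:]
--
--     texto = f"({ddd}) {primeiro}"
--     if miolo:
--         texto += f".{miolo}"
--     if final:
--         texto += f"-{final}"
--     return texto
-- ===== SOURCE B (Python) =====
-- def formatar_telefone_br(valor):
--     digitos = "".join(c for c in str(valor or "") if c.isdigit())
--     if len(digitos) > 11 and digitos.startswith("55"):
--         digitos = digitos[2:]
--     digitos = digitos[:11]
--
--     seps = {0: "(", 2: ") ", 3: ".", 7: "-"}
--     partes = []
--     for i, c in enumerate(digitos):
--         partes.append(seps.get(i, ""))
--         partes.append(c)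
--     return "".join(partes)
-- ===== Notes on version B (the rewrite author's own statement) =====
-- stated objective: simpler
-- what changed: Replaces the chunk-slicing and five-way branch cascade with a single left-to-right pass that emits a fixed separator (from a position-to-separator map at digit positions 0, 2, 3 and 7) before each digit, which reproduces all partial-length outputs automatically.
import Mathlib
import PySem

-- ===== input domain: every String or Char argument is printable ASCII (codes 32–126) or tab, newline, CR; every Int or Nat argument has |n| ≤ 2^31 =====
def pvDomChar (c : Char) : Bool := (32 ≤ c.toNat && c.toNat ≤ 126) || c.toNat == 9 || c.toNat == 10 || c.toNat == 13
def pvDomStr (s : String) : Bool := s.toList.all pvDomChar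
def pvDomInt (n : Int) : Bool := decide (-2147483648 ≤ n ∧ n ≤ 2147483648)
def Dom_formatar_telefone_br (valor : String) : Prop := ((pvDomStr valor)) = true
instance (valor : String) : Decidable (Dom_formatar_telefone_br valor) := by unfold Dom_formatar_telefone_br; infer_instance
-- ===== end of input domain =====

-- B formats by one pass over the digits with a fixed position→separator map instead of A's
-- chunk slices and branch cascade (objective: simpler); same return value on every input.

-- ===== PORT A =====
-- shared preprocessing of both Pythons: filter digits, strip leading '55' when len>11, take 11
def pvDigits (valor : String) : List Char :=
  let d0 := valor.toList.filter (fun c => PySem.Chars.isdigit c)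
  let d1 := if d0.length > 11 && PySem.Chars.startswith d0 ['5', '5']
            then PySem.List.slice d0 (some 2) none else d0
  PySem.List.slice d1 none (some 11)

-- the branch-cascade formatting of A, on the digit list
def pvFmtA (digitos : List Char) : String :=
  if digitos = [] then ""
  else if digitos.length ≤ 2 then String.ofList ('(' :: digitos)
  else
    let ddd := PySem.List.slice digitos none (some 2)
    let restante := PySem.List.slice digitos (some 2) none
    if restante.length = 0 then String.ofList ('(' :: ddd ++ [')'])
    else if restante.length = 1 then String.ofList ('(' :: ddd ++ [')', ' '] ++ restante)
    else
      -- restante[0]: restante is nonempty in this branch, so headI is exact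
      let primeiro := restante.headI
      let miolo := PySem.List.slice restante (some 1) (some 5)
      let final := PySem.List.slice restante (some 5) none
      let texto := '(' :: ddd ++ [')', ' ', primeiro]
      let texto := if miolo ≠ [] then texto ++ '.' :: miolo else texto
      let texto := if final ≠ [] then texto ++ '-' :: final else texto
      String.ofList texto

def formatar_telefone_br (valor : String) : String := pvFmtA (pvDigits valor)

-- ===== PORT B =====
-- seps.get(i, "") of Source B
def pvSep (i : Int) : List Char :=
  if i = 0 then ['('] else if i = 2 then [')', ' ']
  else if i = 3 then ['.'] else if i = 7 then ['-'] else []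

def pvFmtB (digitos : List Char) : String :=
  String.ofList ((PySem.List.enumerate digitos 0).foldl (fun acc p => acc ++ pvSep p.1 ++ [p.2]) [])

def formatar_telefone_br_alt (valor : String) : String := pvFmtB (pvDigits valor)

-- ===== PRECONDITION & SPEC =====
def Spec_formatar_telefone_br (valor : String) (out : String) : Prop := out = formatar_telefone_br_alt valor
instance (valor : String) (out : String) : Decidable (Spec_formatar_telefone_br valor out) := by unfold Spec_formatar_telefone_br; infer_instance

-- ===== CLAIM (what is proved, stated in full; the proofs are below) =====
def Claim_equal_formatar_telefone_br : Prop := ∀ (valor : String), Dom_formatar_telefone_br valor → Spec_formatar_telefone_br valor (formatar_telefone_br valor)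

-- ===== LEMMAS AND PROOFS =====

theorem slice11_len_le (l : List Char) : (PySem.List.slice l none (some 11)).length ≤ 11 := by
  simp [PySem.List.slice, PySem.List.clampIdx]

theorem pvDigits_len_le (valor : String) : (pvDigits valor).length ≤ 11 :=
  slice11_len_le _

theorem pvFmt_eq (d : List Char) (h : d.length ≤ 11) : pvFmtA d = pvFmtB d := by
  rcases d with _ | ⟨a, _ | ⟨b, _ | ⟨c, _ | ⟨e, _ | ⟨f, _ | ⟨g, _ | ⟨i, _ | ⟨j, _ | ⟨k, _ | ⟨l, _ | ⟨m, _ | ⟨n, d⟩⟩⟩⟩⟩⟩⟩⟩⟩⟩⟩⟩ <;>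
    first
      | (simp only [List.length_cons] at h; omega)
      | simp [pvFmtA, pvFmtB, pvSep, PySem.List.enumerate, PySem.List.slice, PySem.List.clampIdx]

theorem formatar_telefone_br_spec : Claim_equal_formatar_telefone_br := by
  intro valor _
  unfold Spec_formatar_telefone_br formatar_telefone_br formatar_telefone_br_alt
  exact pvFmt_eq _ (pvDigits_len_le valor)
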